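-- pv_equiv track=rewrite | github.com/matthieudemari/SUTD_ILP_Computing2020 | W4S2 - MT/Grades/functions/1005487/convert_hours.py | convert_hours
-- ===== SOURCE A (Python) =====
-- def convert_hours(total_hours):
--     hours_week = 24*7 #hours in a week
--     hours_day = 24 #hours in a day
--
--     weeks = 0
--     days = 0
--     hours = 0
--     while total_hours > 0:
--         if total_hours < hours_day:
--             hours += total_hours
--             total_hours = 0
--         else:
--             if total_hours >= hours_week: #enough hours to form week(s)
--                 weeks = total_hours // hours_week
--                 total_hours = total_hours % hours_week #update total_hours left
--             else: #enough hours to form day(s)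
--                 days = total_hours // hours_day
--                 total_hours = total_hours % hours_day #update total_hours left
--     return weeks, days, hours
-- ===== SOURCE B (Python) =====
-- def _qr(n, d):
--     # quotient and remainder by binary long division (doubling), n >= 0, d > 0
--     if n < d:
--         return 0, n
--     q, r = _qr(n, 2 * d)
--     q *= 2
--     if r >= d:
--         q += 1
--         r -= d
--     return q, r
--
--
-- def convert_hours(total_hours):
--     if total_hours <= 0:
--         return 0, 0, 0
--     weeks, rem = _qr(total_hours, 168)
--     days, hours = _qr(rem, 24)
--     return weeks, days, hours
-- ===== Notes on version B (the rewrite author's own statement) =====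
-- stated objective: alternative
-- what changed: Replaces A's while-loop over //-and-% state updates by a recursive binary long-division helper (divisor doubling, no division or modulo operators anywhere) applied twice, behind a non-positive guard.
import Mathlib
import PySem

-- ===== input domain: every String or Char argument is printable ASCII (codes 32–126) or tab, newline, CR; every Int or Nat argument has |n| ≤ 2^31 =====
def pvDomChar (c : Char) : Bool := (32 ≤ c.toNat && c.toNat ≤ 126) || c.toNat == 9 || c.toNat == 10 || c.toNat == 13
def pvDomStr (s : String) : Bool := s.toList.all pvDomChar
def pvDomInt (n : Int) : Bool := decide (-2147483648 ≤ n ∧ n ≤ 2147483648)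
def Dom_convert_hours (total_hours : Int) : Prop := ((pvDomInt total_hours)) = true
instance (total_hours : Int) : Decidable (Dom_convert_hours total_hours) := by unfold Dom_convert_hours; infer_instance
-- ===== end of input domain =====

-- One honest line: B replaces A's while-loop over //-and-% updates by a recursive
-- binary long-division helper (divisor doubling, no division/modulo operators), applied twice (alternative).

-- ===== PORT A =====
-- A's while-loop, transcribed as a recursion over the loop state (total_hours, weeks, days, hours).
def convertHoursLoop (total_hours weeks days hours : Int) : Int × Int × Int :=
  if h : total_hours > 0 then
    if total_hours < 24 then
      convertHoursLoop 0 weeks days (hours + total_hours)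
    else
      if total_hours ≥ 24 * 7 then
        convertHoursLoop (PySem.Int.mod total_hours (24 * 7)) (PySem.Int.floordiv total_hours (24 * 7)) days hours
      else
        convertHoursLoop (PySem.Int.mod total_hours 24) weeks (PySem.Int.floordiv total_hours 24) hours
  else
    (weeks, days, hours)
termination_by total_hours.toNat
decreasing_by
  · omega
  · have h1 := PySem.Int.mod_nonneg total_hours (b := 24 * 7) (by omega)
    have h2 := PySem.Int.mod_lt total_hours (b := 24 * 7) (by omega)
    omega
  · have h1 := PySem.Int.mod_nonneg total_hours (b := 24) (by omega)
    have h2 := PySem.Int.mod_lt total_hours (b := 24) (by omega)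
    omega

def convert_hours (total_hours : Int) : Int × Int × Int :=
  convertHoursLoop total_hours 0 0 0

-- ===== PORT B =====
-- Source B's _qr: binary long division by divisor doubling. The `d ≤ 0` guard only makes the
-- recursion total in Lean (B is only ever called with d = 168 and d = 24, both positive).
def qrAlt (n d : Int) : Int × Int :=
  if hd : d ≤ 0 then (0, n)
  else if n < d then (0, n)
  else
    let p := qrAlt n (2 * d)
    let q := p.1 * 2
    if p.2 ≥ d then (q + 1, p.2 - d) else (q, p.2)
termination_by (n + 1 - d).toNat
decreasing_by omega

def convert_hours_alt (total_hours : Int) : Int × Int × Int :=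
  if total_hours ≤ 0 then (0, 0, 0)
  else
    let wr := qrAlt total_hours 168
    let dh := qrAlt wr.2 24
    (wr.1, dh.1, dh.2)

-- ===== PRECONDITION & SPEC =====
def Spec_convert_hours (total_hours : Int) (out : Int × Int × Int) : Prop := out = convert_hours_alt total_hours
instance (total_hours : Int) (out : Int × Int × Int) : Decidable (Spec_convert_hours total_hours out) := by unfold Spec_convert_hours; infer_instance

-- ===== CLAIM (what is proved, stated in full; the proofs are below) =====
def Claim_equal_convert_hours : Prop := ∀ (total_hours : Int), Dom_convert_hours total_hours → Spec_convert_hours total_hours (convert_hours total_hours)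

-- ===== LEMMAS AND PROOFS =====
-- B side: binary long division computes Euclidean div/mod on nonnegative input.
theorem qrAlt_spec (n d : Int) (hn : 0 ≤ n) (hd : 0 < d) : qrAlt n d = (n / d, n % d) := by
  rw [qrAlt]
  simp only [dif_neg (by omega : ¬ d ≤ 0)]
  by_cases hlt : n < d
  · rw [if_pos hlt, Int.ediv_eq_zero_of_lt hn hlt, Int.emod_eq_of_lt hn hlt]
  · rw [if_neg hlt, qrAlt_spec n (2 * d) hn (by omega)]
    have h2 : 0 ≤ n % (2 * d) ∧ n % (2 * d) < 2 * d :=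
      ⟨Int.emod_nonneg n (by omega), Int.emod_lt_of_pos n (by omega)⟩
    have key : n = 2 * d * (n / (2 * d)) + n % (2 * d) := (Int.ediv_add_emod n (2 * d)).symm
    by_cases hr : n % (2 * d) ≥ d
    · simp only [if_pos hr]
      have huniq := (Int.ediv_emod_unique (a := n) (b := d)
          (r := n % (2 * d) - d) (q := n / (2 * d) * 2 + 1) hd).mpr
          ⟨by linear_combination -key, by omega, by omega⟩
      rw [← huniq.1, ← huniq.2]
    · simp only [if_neg hr]
      have huniq := (Int.ediv_emod_unique (a := n) (b := d)
          (r := n % (2 * d)) (q := n / (2 * d) * 2) hd).mpr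
          ⟨by linear_combination -key, by omega, by omega⟩
      rw [← huniq.1, ← huniq.2]
termination_by (n + 1 - d).toNat
decreasing_by omega

-- A side: one lemma per branch of A's loop.
theorem loop_exit (t w d h : Int) (ht : ¬ t > 0) : convertHoursLoop t w d h = (w, d, h) := by
  rw [convertHoursLoop]; simp [ht]

theorem loop_small (t w d h : Int) (h1 : 0 < t) (h2 : t < 24) :
    convertHoursLoop t w d h = (w, d, h + t) := by
  rw [convertHoursLoop]
  simp only [dif_pos h1, if_pos h2]
  exact loop_exit 0 w d (h + t) (by omega)

theorem loop_mid (t w h : Int) (h1 : 24 ≤ t) (h2 : t < 24 * 7) :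
    convertHoursLoop t w 0 h = (w, t / 24, h + t % 24) := by
  rw [convertHoursLoop]
  simp only [dif_pos (by omega : t > 0), if_neg (by omega : ¬ t < 24), if_neg (by omega : ¬ t ≥ 24 * 7),
    PySem.Int.floordiv_eq_ediv_of_pos (by omega : (0:Int) < 24),
    PySem.Int.mod_eq_emod_of_pos (by omega : (0:Int) < 24)]
  have hb : 0 ≤ t % 24 ∧ t % 24 < 24 := ⟨Int.emod_nonneg t (by omega), Int.emod_lt_of_pos t (by omega)⟩
  by_cases h0 : 0 < t % 24
  · exact loop_small (t % 24) w (t / 24) h h0 (by omega)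
  · rw [loop_exit (t % 24) w (t / 24) h (by omega)]
    have : t % 24 = 0 := by omega
    rw [this]; ring_nf

theorem loop_big (t h : Int) (h1 : 24 * 7 ≤ t) :
    convertHoursLoop t 0 0 h = (t / 168, t % 168 / 24, h + t % 168 % 24) := by
  rw [convertHoursLoop]
  simp only [dif_pos (by omega : t > 0), if_neg (by omega : ¬ t < 24), if_pos (by omega : t ≥ 24 * 7),
    PySem.Int.floordiv_eq_ediv_of_pos (by omega : (0:Int) < 24 * 7),
    PySem.Int.mod_eq_emod_of_pos (by omega : (0:Int) < 24 * 7)]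
  have e : (24 : Int) * 7 = 168 := by norm_num
  rw [e]
  have hb : 0 ≤ t % 168 ∧ t % 168 < 168 := ⟨Int.emod_nonneg t (by omega), Int.emod_lt_of_pos t (by omega)⟩
  by_cases hsm : t % 168 < 24
  · by_cases h0 : 0 < t % 168
    · rw [loop_small (t % 168) (t / 168) 0 h h0 hsm]
      have : t % 168 % 24 = t % 168 := Int.emod_eq_of_lt (by omega) (by omega)
      have hd : t % 168 / 24 = 0 := Int.ediv_eq_zero_of_lt (by omega) (by omega)
      rw [this, hd]
    · rw [loop_exit (t % 168) (t / 168) 0 h (by omega)]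
      have : t % 168 = 0 := by omega
      rw [this]; norm_num
  · exact loop_mid (t % 168) (t / 168) h (by omega) (by omega)

-- ===== VERDICT (by name: the statement is the Claim_ definition above) =====
theorem convert_hours_spec : Claim_equal_convert_hours := by
  intro t _
  unfold Spec_convert_hours convert_hours convert_hours_alt
  by_cases hle : t ≤ 0
  · rw [loop_exit t 0 0 0 (by omega)]; simp [hle]
  · have hb : 0 ≤ t % 168 := Int.emod_nonneg t (by omega)
    simp only [if_neg hle, qrAlt_spec t 168 (by omega) (by omega),
      qrAlt_spec (t % 168) 24 hb (by omega)]
    by_cases hsm : t < 24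
    · rw [loop_small t 0 0 0 (by omega) hsm]
      have h168 : t % 168 = t := Int.emod_eq_of_lt (by omega) (by omega)
      have h24 : t % 24 = t := Int.emod_eq_of_lt (by omega) (by omega)
      have hd : t / 168 = 0 := Int.ediv_eq_zero_of_lt (by omega) (by omega)
      have hd2 : t / 24 = 0 := Int.ediv_eq_zero_of_lt (by omega) (by omega)
      rw [h168, hd, hd2, h24]; norm_num
    · by_cases hwk : 24 * 7 ≤ t
      · rw [loop_big t 0 hwk]; norm_num
      · rw [loop_mid t 0 0 (by omega) (by omega)]
        have h168 : t % 168 = t := Int.emod_eq_of_lt (by omega) (by omega)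
        have hd : t / 168 = 0 := Int.ediv_eq_zero_of_lt (by omega) (by omega)
        rw [h168, hd]; norm_num
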